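-- pv_equiv track=rewrite | github.com/ray1i/Advent-of-Code-Solutions-2019 | day 17.py | convert
-- ===== SOURCE A (Python) =====
-- inc = {'end':10, ',':44, 'A':65, 'B':66, 'C':67, 'R':82, 'L':76, '0':48, 'y':121, 'n':110}
--
-- def convert(l):
--     newlist = []
--     double = False
--     for i in l:
--         if i in [str(s) for s in range(11)]:
--             newlist.append(inc['0'] + int(i))
--             double = True
--         else:
--             if double:
--                 newlist.append(inc[','])
--                 double = False
--             newlist.append(inc[i])
--             newlist.append(inc[','])
--     if not double:
--         del newlist[-1]
--     newlist.append(inc['end'])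
--     return newlist
-- ===== SOURCE B (Python) =====
-- inc = {'end':10, ',':44, 'A':65, 'B':66, 'C':67, 'R':82, 'L':76, '0':48, 'y':121, 'n':110}
-- DIGITS = {str(s) for s in range(11)}
--
-- def convert(l):
--     # tokenize into groups: each maximal run of digit tokens is one group,
--     # each other token is its own group; then join groups with commas.
--     groups = []
--     k = 0
--     while k < len(l):
--         if l[k] in DIGITS:
--             j = k
--             while j < len(l) and l[j] in DIGITS:
--                 j += 1
--             groups.append([inc['0'] + int(c) for c in l[k:j]])
--             k = j
--         else:
--             groups.append([inc[l[k]]])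
--             k += 1
--     out = list(groups[0])
--     for g in groups[1:]:
--         out.append(inc[','])
--         out.extend(g)
--     out.append(inc['end'])
--     return out
-- ===== Notes on version B (the rewrite author's own statement) =====
-- stated objective: alternative
-- what changed: Replaces A's stateful 'double' flag and trailing-comma deletion by explicit tokenization into maximal digit runs plus single commands, joining the groups with commas.
import Mathlib
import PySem

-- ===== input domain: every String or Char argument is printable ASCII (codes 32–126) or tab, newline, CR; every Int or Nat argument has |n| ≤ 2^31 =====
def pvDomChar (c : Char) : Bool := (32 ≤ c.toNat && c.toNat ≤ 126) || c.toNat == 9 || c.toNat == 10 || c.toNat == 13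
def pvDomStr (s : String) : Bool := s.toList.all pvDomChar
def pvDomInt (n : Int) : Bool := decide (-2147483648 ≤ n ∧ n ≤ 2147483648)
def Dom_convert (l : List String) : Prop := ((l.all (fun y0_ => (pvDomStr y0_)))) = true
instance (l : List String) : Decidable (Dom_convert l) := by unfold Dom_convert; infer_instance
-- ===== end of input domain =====

-- B restructures A: tokenize into maximal digit runs / single commands, join groups with commas (alternative decomposition, same cost).


-- shared context: the module constant `inc` and the digit-string list [str(s) for s in range(11)]
def incD : PySem.Dict String Int :=
  PySem.Dict.ofList [("end",10), (",",44), ("A",65), ("B",66), ("C",67), ("R",82), ("L",76), ("0",48), ("y",121), ("n",110)]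

def incGet (s : String) : Int := (PySem.Dict.get? incD s).getD 0

def digitStrs : List String := (PySem.List.pyRange 0 11 1).map PySem.Int.toStr

-- ===== PORT A =====
def convStep (st : List Int × Bool) (i : String) : List Int × Bool :=
  if i ∈ digitStrs then
    (st.1 ++ [incGet "0" + (PySem.Int.ofStr? i).getD 0], true)
  else
    let nl := if st.2 then st.1 ++ [incGet ","] else st.1
    (nl ++ [incGet i, incGet ","], false)

def convert (l : List String) : List Int :=
  let st := l.foldl convStep ([], false)
  let nl := if st.2 then st.1 else st.1.dropLast
  nl ++ [incGet "end"]

-- ===== PORT B =====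
-- tokenizer: maximal runs of digit tokens become one group, other tokens their own group
def groupRuns (l : List String) : List (List Int) :=
  match l with
  | [] => []
  | i :: rest =>
    if i ∈ digitStrs then
      ((i :: rest).takeWhile (fun c => decide (c ∈ digitStrs))).map
          (fun c => incGet "0" + (PySem.Int.ofStr? c).getD 0)
        :: groupRuns (rest.dropWhile (fun c => decide (c ∈ digitStrs)))
    else [incGet i] :: groupRuns rest
termination_by l.length
decreasing_by
  · have := List.length_dropWhile_le (fun c => decide (c ∈ digitStrs)) rest
    simp; omega
  · simp

-- join the groups with commas (Source B's out-building loop)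
def joinG (gs : List (List Int)) : List Int :=
  match gs with
  | [] => []
  | g :: gs => gs.foldl (fun out g' => out ++ incGet "," :: g') g

def convert_alt (l : List String) : List Int :=
  joinG (groupRuns l) ++ [incGet "end"]

-- ===== PRECONDITION & SPEC =====
-- Pre_ excludes exactly the inputs where the Python raises: the empty list (del newlist[-1] → IndexError)
-- and lists containing a token that is neither '0'..'10' nor a key of inc (KeyError); B raises there too.
def Pre_convert (l : List String) : Prop :=
  l ≠ [] ∧ ∀ i ∈ l,
    i ∈ (["0","1","2","3","4","5","6","7","8","9","10","end",",","A","B","C","R","L","y","n"] : List String)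
instance (l : List String) : Decidable (Pre_convert l) := by unfold Pre_convert; infer_instance

def pvWitness_convert : List String := (["L", "4", "10", "R", "y"])

def Spec_convert (l : List String) (out : List Int) : Prop := out = convert_alt l
instance (l : List String) (out : List Int) : Decidable (Spec_convert l out) := by unfold Spec_convert; infer_instance

-- ===== CLAIM (what is proved, stated in full; the proofs are below) =====
def Claim_equal_convert : Prop := ∀ (l : List String), Dom_convert l → Pre_convert l → Spec_convert l (convert l)

-- ===== LEMMAS AND PROOFS =====

-- head of a dropWhile result fails the predicate (small helper used in the main proof)
theorem dropWhile_head_false {α : Type} (p : α → Bool) :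
    ∀ (l : List α) (u : α) (t' : List α), l.dropWhile p = u :: t' → p u = false := by
  intro l
  induction l with
  | nil => intro u t' h; simp [List.dropWhile] at h
  | cons x xs ih =>
    intro u t' h
    rw [List.dropWhile_cons] at h
    by_cases hx : p x
    · simp [hx] at h; exact ih u t' h
    · simp [hx] at h; simp [← h.1]; simpa using hx

theorem joinG_cons (g : List Int) (gs : List (List Int)) :
    joinG (g :: gs) = g ++ gs.flatMap (fun h => incGet "," :: h) := by
  show gs.foldl (fun out g' => out ++ incGet "," :: g') g = _
  induction gs generalizing g with
  | nil => simp
  | cons h t ih => simp [List.foldl_cons, ih, List.flatMap_cons]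

theorem comma_joinG (gs : List (List Int)) (h : gs ≠ []) :
    incGet "," :: joinG gs = gs.flatMap (fun h => incGet "," :: h) := by
  cases gs with
  | nil => simp at h
  | cons g t => simp [joinG_cons, List.flatMap_cons]

theorem groupRuns_ne_nil (l : List String) (h : l ≠ []) : groupRuns l ≠ [] := by
  cases l with
  | nil => simp at h
  | cons i rest => rw [groupRuns]; split <;> simp

-- one comma if the previous token was a digit and the next is not
def lead (b : Bool) (l : List String) : List Int :=
  match l with
  | [] => []
  | i :: _ => if b && !(decide (i ∈ digitStrs)) then [incGet ","] else []

theorem lead_false (l : List String) : lead false l = [] := by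
  cases l <;> simp [lead]

-- processing a nonempty all-digit run
theorem foldl_run (r t : List String) (acc : List Int) (b : Bool)
    (hr : ∀ x ∈ r, x ∈ digitStrs) (hne : r ≠ []) :
    (r ++ t).foldl convStep (acc, b) =
      t.foldl convStep (acc ++ r.map (fun c => incGet "0" + (PySem.Int.ofStr? c).getD 0), true) := by
  induction r generalizing acc b with
  | nil => simp at hne
  | cons x r' ih =>
    have hx : x ∈ digitStrs := hr x (by simp)
    rw [List.cons_append, List.foldl_cons]
    have hstep : convStep (acc, b) x
        = (acc ++ [incGet "0" + (PySem.Int.ofStr? x).getD 0], true) := by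
      simp [convStep, hx]
    rw [hstep]
    cases r' with
    | nil => simp
    | cons y r'' =>
      rw [ih _ _ (fun z hz => hr z (List.mem_cons_of_mem _ hz)) (by simp)]
      simp

theorem main_lemma : ∀ (n : Nat) (l : List String) (acc : List Int) (b : Bool),
    l.length ≤ n → l ≠ [] →
    (let st := l.foldl convStep (acc, b)
     if st.2 then st.1 else st.1.dropLast) = acc ++ lead b l ++ joinG (groupRuns l) := by
  intro n
  induction n with
  | zero => intro l acc b hlen hne; cases l with
    | nil => simp at hne
    | cons i rest => simp at hlen
  | succ n ih =>
    intro l acc b hlen hne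
    cases l with
    | nil => simp at hne
    | cons i rest =>
      by_cases hd : i ∈ digitStrs
      · -- digit head: split off the maximal run
        have hlead : lead b (i :: rest) = [] := by simp [lead, hd]
        have hsplit : i :: rest
            = (i :: rest).takeWhile (fun c => decide (c ∈ digitStrs))
              ++ rest.dropWhile (fun c => decide (c ∈ digitStrs)) := by
          conv_lhs => rw [← List.takeWhile_append_dropWhile (p := fun c => decide (c ∈ digitStrs)) (l := i :: rest)]
          simp [hd]
        set p : String → Bool := fun c => decide (c ∈ digitStrs) with hp
        set r := (i :: rest).takeWhile p with hrdef
        set t := rest.dropWhile p with htdef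
        have hrne : r ≠ [] := by
          rw [hrdef]; simp [hp, hd]
        have hrdig : ∀ x ∈ r, x ∈ digitStrs := by
          intro x hx
          have := List.mem_takeWhile_imp (l := i :: rest) (p := p) (by rw [← hrdef]; exact hx)
          simpa [hp] using this
        have hgr : groupRuns (i :: rest)
            = r.map (fun c => incGet "0" + (PySem.Int.ofStr? c).getD 0) :: groupRuns t := by
          rw [groupRuns, if_pos hd, ← hp, ← hrdef, ← htdef]
        rw [hgr, hlead]
        conv_lhs => rw [hsplit]
        rw [foldl_run r t acc b hrdig hrne]
        set encR := r.map (fun c => incGet "0" + (PySem.Int.ofStr? c).getD 0) with hencR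
        cases ht : t with
        | nil =>
          simp [joinG_cons, groupRuns]
        | cons u t' =>
          have htne : t ≠ [] := by rw [ht]; simp
          have htlen : t.length ≤ n := by
            have h1 := List.length_dropWhile_le p rest
            rw [← htdef] at *
            simp at hlen; omega
          rw [← ht]
          rw [ih t (acc ++ encR) true htlen htne]
          have hu : u ∉ digitStrs := by
            have := dropWhile_head_false p rest u t' (by rw [← htdef, ht])
            simpa [hp] using this
          have hlt : lead true t = [incGet ","] := by
            rw [ht]; simp [lead, hu]
          rw [hlt, joinG_cons]
          rw [← comma_joinG (groupRuns t) (groupRuns_ne_nil t htne)]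
          simp
      · -- non-digit head
        have hstep : convStep (acc, b) i
            = (acc ++ lead b (i :: rest) ++ [incGet i, incGet ","], false) := by
          cases b <;> simp [convStep, hd, lead]
        have hgr : groupRuns (i :: rest) = [incGet i] :: groupRuns rest := by
          rw [groupRuns]; simp [hd]
        rw [hgr, List.foldl_cons, hstep]
        cases hrest : rest with
        | nil =>
          simp only [List.foldl_nil, joinG_cons, groupRuns, List.flatMap_nil, List.append_nil]
          rw [show acc ++ lead b (i :: []) ++ [incGet i, incGet ","]
              = (acc ++ lead b (i :: []) ++ [incGet i]) ++ [incGet ","] by simp]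
          rw [List.dropLast_concat]
          simp
        | cons u t' =>
          have hrne : rest ≠ [] := by rw [hrest]; simp
          have hrlen : rest.length ≤ n := by simp at hlen; omega
          rw [← hrest]
          rw [ih rest (acc ++ lead b (i :: rest) ++ [incGet i, incGet ","]) false hrlen hrne]
          rw [lead_false, joinG_cons]
          rw [← comma_joinG (groupRuns rest) (groupRuns_ne_nil rest hrne)]
          simp

-- ===== VERDICT (by name: the statement is the Claim_ definition above) =====
theorem convert_spec : Claim_equal_convert := by
  intro l _ hpre
  have hne := hpre.1
  show convert l = convert_alt l
  have h := main_lemma l.length l [] false le_rfl hne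
  simp only [lead_false, List.nil_append] at h
  unfold convert convert_alt
  exact congrArg (fun x => x ++ [incGet "end"]) h
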